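-- pv_equiv track=rewrite | github.com/NonlinearFruit/project-euler | project_euler/test_pe932_2025.py | extract_a_and_b
-- ===== SOURCE A (Python) =====
-- def extract_a_and_b(root):
--     square = root**2
--     diff = square - root
--     if diff % 9 != 0:
--         return None
--     str_square = str(square)
--     for digits_in_b in range(1,9):
--         base = 10 ** digits_in_b
--         b = square % base
--         if b == 0:
--             continue
--         a, a_remainder = divmod(diff, base - 1)
--         if a_remainder == 0 and f'{a}{b}' == str_square:
--             return a, b, square
-- ===== SOURCE B (Python) =====
-- def extract_a_and_b(root):
--     square = root * root
--     for digits_in_b in range(1, 9):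
--         base = 10 ** digits_in_b
--         if base > square:
--             break
--         b = square % base
--         a = square // base
--         if 10 * b >= base and a + b == root:
--             return a, b, square
--     return None
-- ===== Notes on version B (the rewrite author's own statement) =====
-- stated objective: simpler
-- what changed: B drops A's string formatting, %9 pre-filter and divmod divisibility test entirely: A's two checks (diff divisible by 10^L-1 with quotient a, and str(a)+str(b) == str(square)) are equivalent to the purely arithmetic condition that b = square % 10^L has exactly L digits and a + b == root for a = square // 10^L, so B tests that directly and breaks once 10^L exceeds the square.
import Mathlib
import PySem

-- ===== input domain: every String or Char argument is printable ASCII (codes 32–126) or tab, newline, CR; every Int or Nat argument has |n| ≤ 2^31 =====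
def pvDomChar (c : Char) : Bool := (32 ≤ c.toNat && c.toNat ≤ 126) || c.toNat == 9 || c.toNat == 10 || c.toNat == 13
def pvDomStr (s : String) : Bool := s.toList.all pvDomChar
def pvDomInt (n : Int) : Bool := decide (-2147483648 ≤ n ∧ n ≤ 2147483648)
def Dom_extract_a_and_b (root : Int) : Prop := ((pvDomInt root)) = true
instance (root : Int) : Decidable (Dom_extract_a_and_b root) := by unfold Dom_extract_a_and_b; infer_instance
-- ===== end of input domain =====

-- B replaces A's string-concatenation + divisibility test by an equivalent pure-arithmetic
-- digit-count/sum test (objective: simpler; return values proved identical for every int root).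

-- ===== PORT A =====
-- integer power 10 ** e / root ** 2 (exact for natural exponents, as used by both Pythons)
def pvPow (m : Int) : Nat → Int
  | 0 => 1
  | n + 1 => pvPow m n * m

-- the for-loop with continue/early-return, one constructor per iteration
def pvLoopA : List Int → Int → Int → List Char → Option (Int × Int × Int)
  | [], _, _, _ => none
  | L :: rest, square, diff, s =>
    let base : Int := pvPow 10 L.toNat    -- 10 ** digits_in_b (digits_in_b ≥ 1 here)
    let b := PySem.Int.mod square base
    if b = 0 then pvLoopA rest square diff s
    else
      let a := PySem.Int.floordiv diff (base - 1)
      let aRem := PySem.Int.mod diff (base - 1)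
      -- f'{a}{b}' == str_square, compared as character lists
      if aRem = 0 ∧ PySem.Int.toChars a ++ PySem.Int.toChars b = s then some (a, b, square)
      else pvLoopA rest square diff s

def extract_a_and_b (root : Int) : Option (Int × Int × Int) :=
  let square := pvPow root 2
  let diff := square - root
  if PySem.Int.mod diff 9 ≠ 0 then none
  else pvLoopA (PySem.List.pyRange 1 9 1) square diff (PySem.Int.toChars square)

-- ===== PORT B =====
-- the for-loop with break/early-return, one constructor per iteration
def pvLoopB : List Int → Int → Int → Option (Int × Int × Int)
  | [], _, _ => none
  | L :: rest, square, root =>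
    let base : Int := pvPow 10 L.toNat    -- 10 ** digits_in_b (digits_in_b ≥ 1 here)
    if base > square then none              -- break
    else
      let b := PySem.Int.mod square base
      let a := PySem.Int.floordiv square base
      if 10 * b ≥ base ∧ a + b = root then some (a, b, square)
      else pvLoopB rest square root

def extract_a_and_b_alt (root : Int) : Option (Int × Int × Int) :=
  pvLoopB (PySem.List.pyRange 1 9 1) (root * root) root

-- ===== PRECONDITION & SPEC =====
def Spec_extract_a_and_b (root : Int) (out : Option (Int × Int × Int)) : Prop := out = extract_a_and_b_alt root
instance (root : Int) (out : Option (Int × Int × Int)) : Decidable (Spec_extract_a_and_b root out) := by unfold Spec_extract_a_and_b; infer_instance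

-- ===== CLAIM (what is proved, stated in full; the proofs are below) =====
def Claim_equal_extract_a_and_b : Prop := ∀ (root : Int), Dom_extract_a_and_b root → Spec_extract_a_and_b root (extract_a_and_b root)

-- ===== LEMMAS AND PROOFS =====

-- pvPow (used in the ports) agrees with Monoid.npow (used in the lemmas)
lemma pv_intPow_eq (m : ℤ) (n : ℕ) : pvPow m n = m ^ n := by
  induction n with
  | zero => rw [pow_zero]; rfl
  | succ n ih => show pvPow m n * m = m ^ (n + 1); rw [ih, pow_succ]

-- decimal representation of a natural number, in terms of Nat.digits
def pvRep (n : ℕ) : List Char := if n = 0 then ['0'] else ((Nat.digits 10 n).map Nat.digitChar).reverse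

-- value read back from a decimal character list
def pvVal (l : List Char) : ℕ := Nat.ofDigits 10 ((l.map (fun c => c.toNat - 48)).reverse)

lemma pvToDigitsCore_eq (f : ℕ) : ∀ (n : ℕ) (ds : List Char), n < f →
    Nat.toDigitsCore 10 f n ds = pvRep n ++ ds := by
  induction f with
  | zero => intro n ds h; omega
  | succ f ih =>
    intro n ds h
    rw [Nat.toDigitsCore]
    by_cases h0 : n / 10 = 0
    · rw [if_pos h0]
      by_cases hn : n = 0
      · subst hn; rfl
      · rw [pvRep, if_neg hn, Nat.digits_def' (by norm_num) (Nat.pos_of_ne_zero hn), h0,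
          Nat.digits_zero]
        have : n % 10 = n := Nat.mod_eq_of_lt (by omega)
        simp [this]
    · rw [if_neg h0, ih (n / 10) _ (by omega)]
      have hn : n ≠ 0 := by omega
      simp only [pvRep, if_neg hn, if_neg h0]
      rw [Nat.digits_def' (b := 10) (by norm_num) (Nat.pos_of_ne_zero hn)]
      simp

lemma pvToDigits_eq (n : ℕ) : Nat.toDigits 10 n = pvRep n := by
  rw [Nat.toDigits, pvToDigitsCore_eq (n + 1) n [] (by omega), List.append_nil]

lemma pvToChars_eq (x : ℤ) (h : 0 ≤ x) : PySem.Int.toChars x = pvRep x.toNat := by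
  rw [PySem.Int.toChars, if_neg (by omega), pvToDigits_eq]

lemma pv_dc_val (d : ℕ) (h : d < 10) : (Nat.digitChar d).toNat - 48 = d := by
  interval_cases d <;> decide

lemma pvVal_pvRep (n : ℕ) : pvVal (pvRep n) = n := by
  by_cases hn : n = 0
  · subst hn; decide
  · rw [pvRep, if_neg hn, pvVal, List.map_reverse, List.reverse_reverse, List.map_map]
    have : (Nat.digits 10 n).map ((fun c => c.toNat - 48) ∘ Nat.digitChar) = Nat.digits 10 n := by
      rw [List.map_congr_left (g := id) ?_, List.map_id]
      intro d hd
      exact pv_dc_val d (Nat.digits_lt_base (by norm_num) hd)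
    rw [this, Nat.ofDigits_digits]

lemma pvRep_len_pos (n : ℕ) : 1 ≤ (pvRep n).length := by
  by_cases hn : n = 0
  · subst hn; decide
  · rw [pvRep, if_neg hn, List.length_reverse, List.length_map]
    exact List.length_pos_iff.mpr (Nat.digits_ne_nil_iff_ne_zero.mpr hn)

lemma pv_digits_len_pos (b : ℕ) (hb : b ≠ 0) : 1 ≤ (Nat.digits 10 b).length := by
  exact List.length_pos_iff.mpr (Nat.digits_ne_nil_iff_ne_zero.mpr hb)

lemma pv_digits_bounds (b : ℕ) (hb : b ≠ 0) :
    10 ^ ((Nat.digits 10 b).length - 1) ≤ b ∧ b < 10 ^ (Nat.digits 10 b).length := by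
  constructor
  · by_contra hlt
    have h2 : (Nat.digits 10 b).length ≤ (Nat.digits 10 b).length - 1 :=
      (Nat.digits_length_le_iff (by norm_num) b).mpr (by omega)
    have := pv_digits_len_pos b hb
    omega
  · exact (Nat.digits_length_le_iff (by norm_num) b).mp le_rfl

lemma pv_digits_len_eq (b k : ℕ) (h1 : 10 ^ (k - 1) ≤ b) (h2 : b < 10 ^ k) (hk : 1 ≤ k) :
    (Nat.digits 10 b).length = k := by
  have hb : b ≠ 0 := by
    have : 0 < 10 ^ (k - 1) := Nat.pow_pos (by norm_num)
    omega
  have hle : (Nat.digits 10 b).length ≤ k := (Nat.digits_length_le_iff (by norm_num) b).mpr h2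
  have hgt : ¬ (Nat.digits 10 b).length ≤ k - 1 := by
    intro hc
    have := (Nat.digits_length_le_iff (by norm_num) b).mp hc
    omega
  omega

lemma pvConcat_iff (a b sq : ℕ) (hb : b ≠ 0) :
    pvRep a ++ pvRep b = pvRep sq ↔
      (a ≠ 0 ∧ sq = a * 10 ^ (Nat.digits 10 b).length + b) := by
  constructor
  · intro h
    by_cases ha : a = 0
    · exfalso
      subst ha
      have hval := congrArg pvVal h
      have hlen := congrArg List.length h
      rw [pvVal_pvRep] at hval
      have hrep0 : pvRep 0 = ['0'] := rfl
      rw [hrep0] at hval hlen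
      have hv : pvVal (['0'] ++ pvRep b) = pvVal (pvRep b) := by
        have h0 : (List.map (fun c => c.toNat - 48) ['0']) = [0] := by decide
        rw [pvVal, pvVal, List.map_append, h0, List.reverse_append, Nat.ofDigits_append]
        simp
      rw [hv, pvVal_pvRep] at hval
      rw [List.length_append] at hlen
      simp at hlen
      rw [← hval] at hlen
      omega
    · have hsq : sq ≠ 0 := by
        intro hc
        subst hc
        have hlen := congrArg List.length h
        rw [List.length_append] at hlen
        have := pvRep_len_pos a
        have := pvRep_len_pos b
        have : (pvRep 0).length = 1 := rfl
        omega
      have key : pvRep a ++ pvRep b = pvRep (b + 10 ^ (Nat.digits 10 b).length * a) := by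
        have hv : b + 10 ^ (Nat.digits 10 b).length * a ≠ 0 := by
          have : b ≠ 0 := hb
          omega
        rw [pvRep, if_neg ha, pvRep, if_neg hb, pvRep, if_neg hv,
          ← List.reverse_append, ← List.map_append, Nat.digits_append_digits (by norm_num)]
      rw [key] at h
      have := congrArg pvVal h
      rw [pvVal_pvRep, pvVal_pvRep] at this
      exact ⟨ha, by linarith [this]⟩
  · rintro ⟨ha, rfl⟩
    have key : pvRep a ++ pvRep b = pvRep (b + 10 ^ (Nat.digits 10 b).length * a) := by
      have hv : b + 10 ^ (Nat.digits 10 b).length * a ≠ 0 := by omega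
      rw [pvRep, if_neg ha, pvRep, if_neg hb, pvRep, if_neg hv,
        ← List.reverse_append, ← List.map_append, Nat.digits_append_digits (by norm_num)]
    rw [key]
    congr 1
    ring

lemma pv_pow_mono (a b : ℕ) (h : a ≤ b) : (10:ℤ) ^ a ≤ 10 ^ b := by
  apply pow_le_pow_right₀ (by norm_num) h

lemma pv_nine_dvd (k : ℕ) : (9:ℤ) ∣ 10 ^ k - 1 := by
  induction k with
  | zero => decide
  | succ k ih =>
    have : (10:ℤ) ^ (k + 1) - 1 = 10 * (10 ^ k - 1) + 9 := by ring
    rw [this]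
    exact dvd_add (Dvd.dvd.mul_left ih 10) (by decide)

-- A's match conditions at exponent k imply B's (and the two a's agree, and base ≤ square).
set_option maxHeartbeats 1000000 in
lemma pvA_to_B (root : ℤ) (k : ℕ) (hk : 1 ≤ k)
    (hb : PySem.Int.mod (root ^ 2) (10 ^ k) ≠ 0)
    (hrem : PySem.Int.mod (root ^ 2 - root) (10 ^ k - 1) = 0)
    (hcat : PySem.Int.toChars (PySem.Int.floordiv (root ^ 2 - root) (10 ^ k - 1)) ++
        PySem.Int.toChars (PySem.Int.mod (root ^ 2) (10 ^ k)) = PySem.Int.toChars (root ^ 2)) :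
    (10:ℤ) ^ k ≤ root ^ 2 ∧
    10 * PySem.Int.mod (root ^ 2) (10 ^ k) ≥ 10 ^ k ∧
    PySem.Int.floordiv (root ^ 2) (10 ^ k) + PySem.Int.mod (root ^ 2) (10 ^ k) = root ∧
    PySem.Int.floordiv (root ^ 2 - root) (10 ^ k - 1) =
      PySem.Int.floordiv (root ^ 2) (10 ^ k) := by
  obtain ⟨k', rfl⟩ : ∃ k', k = k' + 1 := ⟨k - 1, by omega⟩
  have hsucc : (10:ℤ) ^ (k' + 1) = 10 ^ k' * 10 := pow_succ 10 k'
  have hk'1 : (1:ℤ) ≤ 10 ^ k' := by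
    have := pow_pos (show (0:ℤ) < 10 by norm_num) k'
    omega
  have hK0 : (0:ℤ) < 10 ^ (k' + 1) := by linarith
  have hK10 : (10:ℤ) ≤ 10 ^ (k' + 1) := by linarith
  have hK1 : (0:ℤ) < 10 ^ (k' + 1) - 1 := by linarith
  have hsqnn : (0:ℤ) ≤ root ^ 2 := sq_nonneg root
  have hdiffnn : (0:ℤ) ≤ root ^ 2 - root := by
    rcases le_total root 0 with h | h <;> nlinarith
  rw [PySem.Int.mod_eq_emod_of_pos hK0] at hb
  rw [PySem.Int.mod_eq_emod_of_pos hK1] at hrem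
  rw [PySem.Int.mod_eq_emod_of_pos hK0, PySem.Int.floordiv_eq_ediv_of_pos hK1] at hcat
  rw [PySem.Int.mod_eq_emod_of_pos hK0, PySem.Int.floordiv_eq_ediv_of_pos hK0,
    PySem.Int.floordiv_eq_ediv_of_pos hK1]
  set sq := root ^ 2 with hsqdef
  set b := sq % 10 ^ (k' + 1) with hbdef
  set aA := (sq - root) / (10 ^ (k' + 1) - 1) with hadef
  have hbnn : 0 ≤ b := Int.emod_nonneg sq (by positivity)
  have hblt : b < 10 ^ (k' + 1) := Int.emod_lt_of_pos sq hK0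
  have haAnn : 0 ≤ aA := Int.ediv_nonneg hdiffnn (by linarith)
  have hdiffeq : sq - root = (10 ^ (k' + 1) - 1) * aA := by
    have h1 := Int.mul_ediv_add_emod (sq - root) (10 ^ (k' + 1) - 1)
    rw [hrem] at h1
    linarith
  rw [pvToChars_eq _ haAnn, pvToChars_eq _ hbnn, pvToChars_eq _ hsqnn] at hcat
  have hBne : b.toNat ≠ 0 := by omega
  obtain ⟨hAne, hSQ⟩ := (pvConcat_iff _ _ _ hBne).mp hcat
  set d := (Nat.digits 10 b.toNat).length with hddef
  obtain ⟨hdlow, hdhigh⟩ := pv_digits_bounds b.toNat hBne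
  have hd1 : 1 ≤ d := pv_digits_len_pos _ hBne
  have ha1 : (1:ℤ) ≤ aA := by omega
  have hb1 : (1:ℤ) ≤ b := by omega
  have hSQz : sq = aA * (10:ℤ) ^ d + b := by
    have h2 := congrArg (fun n : ℕ => (n : ℤ)) hSQ
    push_cast at h2
    rw [Int.toNat_of_nonneg hsqnn, Int.toNat_of_nonneg haAnn, Int.toNat_of_nonneg hbnn] at h2
    exact h2
  have hdlowz : (10:ℤ) ^ (d - 1) ≤ b := by
    have h2 : (((10:ℕ) ^ (d - 1) : ℕ) : ℤ) ≤ (b.toNat : ℤ) := by exact_mod_cast hdlow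
    rw [Int.toNat_of_nonneg hbnn] at h2
    push_cast at h2
    exact h2
  have hdhighz : b < (10:ℤ) ^ d := by
    have h2 : (b.toNat : ℤ) < (((10:ℕ) ^ d : ℕ) : ℤ) := by exact_mod_cast hdhigh
    rw [Int.toNat_of_nonneg hbnn] at h2
    push_cast at h2
    exact h2
  have hdk : d ≤ k' + 1 := by
    by_contra hc
    have hle : ((10:ℤ)) ^ (k' + 1) ≤ 10 ^ (d - 1) := pv_pow_mono _ _ (by omega)
    linarith
  have hroot : root = sq - (10 ^ (k' + 1) - 1) * aA := by linarith
  rcases Nat.lt_or_ge d (k' + 1) with hdlt | hdge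
  · exfalso
    have hM10 : (10:ℤ) ≤ 10 ^ d := by
      calc (10:ℤ) = 10 ^ 1 := (pow_one 10).symm
        _ ≤ 10 ^ d := pv_pow_mono 1 d hd1
    have hKM : 10 * (10:ℤ) ^ d ≤ 10 ^ (k' + 1) := by
      calc 10 * (10:ℤ) ^ d = 10 ^ (d + 1) := by rw [pow_succ]; ring
        _ ≤ 10 ^ (k' + 1) := pv_pow_mono _ _ (by omega)
    have hP : (10:ℤ) ^ d ≤ aA * 10 ^ d := le_mul_of_one_le_left (by linarith) ha1
    have haM : aA ≤ aA * 10 ^ d := le_mul_of_one_le_right (by linarith) (by linarith)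
    have hK' : aA * (10 * 10 ^ d) ≤ aA * 10 ^ (k' + 1) := by
      apply mul_le_mul_of_nonneg_left hKM (by linarith)
    have hroot7 : root ≤ -7 * (aA * 10 ^ d) := by
      linarith [hroot, hSQz, hK', hdhighz, haM, hP]
    have hsqle : root ^ 2 ≤ 2 * (aA * 10 ^ d) := by
      linarith [hsqdef, hSQz, hdhighz, hP]
    have hQ10 : (10:ℤ) ≤ aA * 10 ^ d := by linarith
    nlinarith [sq_nonneg (root + 7 * (aA * 10 ^ d)), hroot7, hsqle, hQ10]
  · have hdeq : d = k' + 1 := by omega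
    rw [hdeq] at hSQz hdlowz
    have hsum' : sq / 10 ^ (k' + 1) = aA := by
      rw [show sq = b + aA * 10 ^ (k' + 1) by linarith]
      rw [Int.add_mul_ediv_right _ _ (by omega : (10:ℤ) ^ (k' + 1) ≠ 0)]
      rw [Int.ediv_eq_zero_of_lt hbnn hblt]
      ring
    refine ⟨?_, ?_, ?_, ?_⟩
    · nlinarith
    · have h1 : (10:ℤ) ^ (k' + 1 - 1) = 10 ^ k' := by norm_num
      rw [h1] at hdlowz
      linarith
    · rw [hsum']
      linarith
    · rw [hsum']

-- B's match conditions at exponent k imply A's (with the same a), and 9 ∣ diff.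
lemma pvB_to_A (root : ℤ) (k : ℕ) (hk : 1 ≤ k)
    (hle : (10:ℤ) ^ k ≤ root ^ 2)
    (hb10 : 10 * PySem.Int.mod (root ^ 2) (10 ^ k) ≥ 10 ^ k)
    (hsum : PySem.Int.floordiv (root ^ 2) (10 ^ k) + PySem.Int.mod (root ^ 2) (10 ^ k) = root) :
    PySem.Int.mod (root ^ 2) (10 ^ k) ≠ 0 ∧
    PySem.Int.mod (root ^ 2 - root) (10 ^ k - 1) = 0 ∧
    PySem.Int.floordiv (root ^ 2 - root) (10 ^ k - 1) =
      PySem.Int.floordiv (root ^ 2) (10 ^ k) ∧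
    PySem.Int.toChars (PySem.Int.floordiv (root ^ 2) (10 ^ k)) ++
      PySem.Int.toChars (PySem.Int.mod (root ^ 2) (10 ^ k)) = PySem.Int.toChars (root ^ 2) ∧
    (9:ℤ) ∣ root ^ 2 - root := by
  obtain ⟨k', rfl⟩ : ∃ k', k = k' + 1 := ⟨k - 1, by omega⟩
  have hsucc : (10:ℤ) ^ (k' + 1) = 10 ^ k' * 10 := pow_succ 10 k'
  have hk'1 : (1:ℤ) ≤ 10 ^ k' := by
    have := pow_pos (show (0:ℤ) < 10 by norm_num) k'
    omega
  have hK0 : (0:ℤ) < 10 ^ (k' + 1) := by linarith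
  have hK10 : (10:ℤ) ≤ 10 ^ (k' + 1) := by linarith
  have hK1 : (0:ℤ) < 10 ^ (k' + 1) - 1 := by linarith
  have hsqnn : (0:ℤ) ≤ root ^ 2 := sq_nonneg root
  rw [PySem.Int.mod_eq_emod_of_pos hK0] at hb10
  rw [PySem.Int.mod_eq_emod_of_pos hK0, PySem.Int.floordiv_eq_ediv_of_pos hK0] at hsum
  rw [PySem.Int.mod_eq_emod_of_pos hK0, PySem.Int.mod_eq_emod_of_pos hK1,
    PySem.Int.floordiv_eq_ediv_of_pos hK1, PySem.Int.floordiv_eq_ediv_of_pos hK0]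
  set sq := root ^ 2 with hsqdef
  set b := sq % 10 ^ (k' + 1) with hbdef
  set aB := sq / 10 ^ (k' + 1) with hadef
  have hbnn : 0 ≤ b := Int.emod_nonneg sq (by positivity)
  have hblt : b < 10 ^ (k' + 1) := Int.emod_lt_of_pos sq hK0
  have hb1 : (1:ℤ) ≤ b := by linarith
  have hdecomp : 10 ^ (k' + 1) * aB + b = sq := Int.mul_ediv_add_emod sq (10 ^ (k' + 1))
  have haB1 : (1:ℤ) ≤ aB := by
    rw [hadef]
    exact (Int.le_ediv_iff_mul_le hK0).mpr (by linarith)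
  have hdiffeq : sq - root = (10 ^ (k' + 1) - 1) * aB := by
    have h1 : root = aB + b := hsum.symm
    nlinarith [hdecomp]
  refine ⟨by linarith, ?_, ?_, ?_, ?_⟩
  · rw [hdiffeq]
    exact Int.mul_emod_right _ _
  · rw [hdiffeq]
    exact Int.mul_ediv_cancel_left aB (by linarith)
  · have haBnn : (0:ℤ) ≤ aB := by linarith
    rw [pvToChars_eq _ haBnn, pvToChars_eq _ hbnn, pvToChars_eq _ hsqnn]
    have hBne : b.toNat ≠ 0 := by omega
    apply (pvConcat_iff _ _ _ hBne).mpr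
    have hlowb : (10:ℤ) ^ k' ≤ b := by linarith
    have hd : (Nat.digits 10 b.toNat).length = k' + 1 := by
      apply pv_digits_len_eq _ _ ?_ ?_ (by omega)
      · have h1 : ((10:ℕ) ^ (k' + 1 - 1) : ℤ) ≤ (b.toNat : ℤ) := by
          rw [Int.toNat_of_nonneg hbnn]
          push_cast
          exact hlowb
        exact_mod_cast h1
      · have h1 : (b.toNat : ℤ) < ((10:ℕ) ^ (k' + 1) : ℤ) := by
          rw [Int.toNat_of_nonneg hbnn]
          push_cast
          exact hblt
        exact_mod_cast h1
    refine ⟨by omega, ?_⟩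
    rw [hd]
    have h2 : (sq.toNat : ℤ) = (aB.toNat : ℤ) * ((10:ℕ) ^ (k' + 1) : ℕ) + (b.toNat : ℤ) := by
      rw [Int.toNat_of_nonneg hsqnn, Int.toNat_of_nonneg hbnn,
        Int.toNat_of_nonneg (by linarith : (0:ℤ) ≤ aB)]
      push_cast
      linarith [hdecomp]
    exact_mod_cast h2
  · rw [hdiffeq]
    exact Dvd.dvd.mul_right (pv_nine_dvd (k' + 1)) aB

-- A's loop returns none when every remaining base already exceeds the square.
lemma pvLoopA_none (root : ℤ) (ls : List ℤ)
    (h : ∀ L ∈ ls, 1 ≤ L ∧ root ^ 2 < 10 ^ L.toNat) :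
    pvLoopA ls (root ^ 2) (root ^ 2 - root) (PySem.Int.toChars (root ^ 2)) = none := by
  induction ls with
  | nil => rfl
  | cons L rest ih =>
    obtain ⟨hL1, hLgt⟩ := h L (by simp)
    have hrest : ∀ L' ∈ rest, 1 ≤ L' ∧ root ^ 2 < 10 ^ L'.toNat :=
      fun L' hL' => h L' (by simp [hL'])
    simp only [pvLoopA, pv_intPow_eq]
    by_cases hb : PySem.Int.mod (root ^ 2) (10 ^ L.toNat) = 0
    · rw [if_pos hb]
      exact ih hrest
    · rw [if_neg hb, if_neg ?_]
      · exact ih hrest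
      rintro ⟨h1, h2⟩
      obtain ⟨hle, -, -, -⟩ := pvA_to_B root L.toNat (by omega) hb h1 h2
      linarith

-- B's loop returns none when 9 does not divide diff.
lemma pvLoopB_none (root : ℤ) (ls : List ℤ)
    (h1 : ∀ L ∈ ls, 1 ≤ L) (h9 : ¬ (9:ℤ) ∣ root ^ 2 - root) :
    pvLoopB ls (root * root) root = none := by
  have hrr : root * root = root ^ 2 := by ring
  rw [hrr]
  induction ls with
  | nil => rfl
  | cons L rest ih =>
    have hL1 : 1 ≤ L := h1 L (by simp)
    simp only [pvLoopB, pv_intPow_eq]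
    by_cases hbreak : 10 ^ L.toNat > root ^ 2
    · rw [if_pos hbreak]
    · rw [if_neg hbreak, if_neg ?_]
      · exact ih (fun L' hL' => h1 L' (by simp [hL']))
      rintro ⟨hc1, hc2⟩
      obtain ⟨-, -, -, -, hdvd⟩ :=
        pvB_to_A root L.toNat (by omega) (by omega) hc1 hc2
      exact h9 hdvd

-- the two loops agree when 9 ∣ diff, over a strictly increasing list of positive exponents
lemma pvLoops_eq (root : ℤ) (ls : List ℤ)
    (h1 : ∀ L ∈ ls, 1 ≤ L) (hp : ls.Pairwise (· < ·)) (h9 : (9:ℤ) ∣ root ^ 2 - root) :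
    pvLoopA ls (root ^ 2) (root ^ 2 - root) (PySem.Int.toChars (root ^ 2)) =
      pvLoopB ls (root * root) root := by
  have hrr : root * root = root ^ 2 := by ring
  rw [hrr]
  induction ls with
  | nil => rfl
  | cons L rest ih =>
    have hL1 : 1 ≤ L := h1 L (by simp)
    have hrest1 : ∀ L' ∈ rest, 1 ≤ L' := fun L' hL' => h1 L' (by simp [hL'])
    have hpair := List.pairwise_cons.mp hp
    simp only [pvLoopA, pvLoopB, pv_intPow_eq]
    by_cases hbreak : 10 ^ L.toNat > root ^ 2
    · rw [if_pos hbreak]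
      by_cases hb : PySem.Int.mod (root ^ 2) (10 ^ L.toNat) = 0
      · rw [if_pos hb]
        apply pvLoopA_none root rest
        intro L' hL'
        refine ⟨hrest1 L' hL', lt_of_lt_of_le hbreak (pv_pow_mono _ _ ?_)⟩
        have := hpair.1 L' hL'
        omega
      · rw [if_neg hb, if_neg ?_]
        · apply pvLoopA_none root rest
          intro L' hL'
          refine ⟨hrest1 L' hL', lt_of_lt_of_le hbreak (pv_pow_mono _ _ ?_)⟩
          have := hpair.1 L' hL'
          omega
        rintro ⟨hc1, hc2⟩
        obtain ⟨hle, -, -, -⟩ := pvA_to_B root L.toNat (by omega) hb hc1 hc2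
        linarith
    · rw [if_neg hbreak]
      by_cases hm : 10 * PySem.Int.mod (root ^ 2) (10 ^ L.toNat) ≥ 10 ^ L.toNat ∧
          PySem.Int.floordiv (root ^ 2) (10 ^ L.toNat) +
            PySem.Int.mod (root ^ 2) (10 ^ L.toNat) = root
      · rw [if_pos hm]
        obtain ⟨hb0, hrem, haeq, hcat, -⟩ :=
          pvB_to_A root L.toNat (by omega) (by omega) hm.1 hm.2
        have hcat' : PySem.Int.toChars (PySem.Int.floordiv (root ^ 2 - root) (10 ^ L.toNat - 1)) ++
            PySem.Int.toChars (PySem.Int.mod (root ^ 2) (10 ^ L.toNat)) =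
            PySem.Int.toChars (root ^ 2) := by rw [haeq]; exact hcat
        rw [if_neg hb0, if_pos ⟨hrem, hcat'⟩, haeq]
      · rw [if_neg hm]
        by_cases hb : PySem.Int.mod (root ^ 2) (10 ^ L.toNat) = 0
        · rw [if_pos hb]
          exact ih hrest1 hpair.2
        · rw [if_neg hb, if_neg ?_]
          · exact ih hrest1 hpair.2
          rintro ⟨hc1, hc2⟩
          obtain ⟨-, hb10, hsum, -⟩ := pvA_to_B root L.toNat (by omega) hb hc1 hc2
          exact hm ⟨hb10, hsum⟩

-- ===== VERDICT (by name: the statement is the Claim_ definition above) =====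
theorem extract_a_and_b_spec : Claim_equal_extract_a_and_b := by
  intro root _
  unfold Spec_extract_a_and_b extract_a_and_b extract_a_and_b_alt
  simp only [pv_intPow_eq]
  have hmem : ∀ L ∈ PySem.List.pyRange 1 9 1, 1 ≤ L := by
    intro L hL
    exact ((PySem.List.mem_pyRange_one).mp hL).1
  by_cases h9 : PySem.Int.mod (root ^ 2 - root) 9 = 0
  · simp only [h9, ne_eq, not_true_eq_false, if_false]
    exact pvLoops_eq root _ hmem (PySem.List.pairwise_lt_pyRange_one 1 9)
      ((PySem.Int.mod_eq_zero_iff_dvd _ _).mp h9)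
  · simp only [h9, ne_eq, not_false_eq_true, if_true]
    exact (pvLoopB_none root _ hmem
      (fun hc => h9 ((PySem.Int.mod_eq_zero_iff_dvd _ _).mpr hc))).symm
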